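-- pv_equiv track=rewrite | github.com/giokezo/Letroso-Solver | engine.py | pattern_to_str
-- ===== SOURCE A (Python) =====
-- BLACK  = 0
--
-- YELLOW = 1
--
-- GREEN  = 2
--
-- BORDER = 3
--
-- _BASE = 8   # state*2 + concat_right  →  values 0–7
--
-- def decode_pattern(pattern_int: int, length: int) -> tuple[list[int], list[bool]]:
--     """Decode a pattern int into (states, concat_rights) for debugging."""
--     states = []
--     concats = []
--     for _ in range(length):
--         v = pattern_int % _BASE
--         states.append(v // 2)
--         concats.append(bool(v % 2))
--         pattern_int //= _BASE
--     return states, concats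
--
-- def pattern_to_str(pattern_int: int, length: int) -> str:
--     """Convert a pattern int to human-readable feedback string."""
--     states, concats = decode_pattern(pattern_int, length)
--     _MAP = {BLACK: "B", YELLOW: "Y", GREEN: "G", BORDER: "P"}
--     parts = []
--     for i in range(length):
--         parts.append(_MAP[states[i]])
--         if concats[i] and i < length - 1:
--             parts.append("O")
--     return "".join(parts)
-- ===== SOURCE B (Python) =====
-- _LETTERS = ("B", "Y", "G", "P")
--
-- def pattern_to_str(pattern_int: int, length: int) -> str:
--     """Single pass over the base-8 digits; no intermediate states/concats tables."""
--     parts = []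
--     for i in range(length):
--         pattern_int, v = divmod(pattern_int, 8)
--         parts.append(_LETTERS[v // 2])
--         if v % 2 and i < length - 1:
--             parts.append("O")
--     return "".join(parts)
-- ===== Notes on version B (the rewrite author's own statement) =====
-- stated objective: simpler
-- what changed: B fuses A's two phases (decode into states/concats lists, then an index loop with a dict lookup) into one divmod pass over the base-8 digits that appends letters directly, never materializing the intermediate tables.
import Mathlib
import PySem

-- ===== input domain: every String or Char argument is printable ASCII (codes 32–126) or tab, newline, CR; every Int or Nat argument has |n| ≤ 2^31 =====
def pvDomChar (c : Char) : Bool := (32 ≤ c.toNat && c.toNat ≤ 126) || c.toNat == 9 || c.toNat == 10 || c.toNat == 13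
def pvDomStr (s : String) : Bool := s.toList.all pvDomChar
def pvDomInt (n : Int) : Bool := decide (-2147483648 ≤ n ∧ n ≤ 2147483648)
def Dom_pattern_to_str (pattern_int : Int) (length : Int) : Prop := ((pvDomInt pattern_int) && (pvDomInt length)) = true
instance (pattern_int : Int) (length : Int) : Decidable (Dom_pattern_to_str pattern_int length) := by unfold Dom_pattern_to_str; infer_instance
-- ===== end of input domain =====

-- B replaces A's decode-into-tables-then-index structure by a single fused divmod pass (objective: simpler).

-- ===== PORT A =====
-- decode_pattern: loop appending v // 2 and bool(v % 2), halving pattern_int by base 8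
def decode_pattern (pattern_int : Int) (length : Int) : List Int × List Bool :=
  let st := (PySem.List.pyRange 0 length 1).foldl
    (fun (st : List Int × List Bool × Int) _ =>
      (st.1 ++ [PySem.Int.floordiv (PySem.Int.mod st.2.2 8) 2],
       st.2.1 ++ [decide (PySem.Int.mod (PySem.Int.mod st.2.2 8) 2 ≠ 0)],
       PySem.Int.floordiv st.2.2 8))
    ([], [], pattern_int)
  (st.1, st.2.1)

-- _MAP = {BLACK: "B", YELLOW: "Y", GREEN: "G", BORDER: "P"}
def aMAP : PySem.Dict Int String := PySem.Dict.ofList [(0, "B"), (1, "Y"), (2, "G"), (3, "P")]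

def pattern_to_str (pattern_int : Int) (length : Int) : String :=
  let sc := decode_pattern pattern_int length
  -- states[i] / concats[i]: i ∈ range(length) is always in range, and _MAP's key (states entry,
  -- always 0..3) is always present, so the total pyGetD / .getD "" forms are exact here
  let parts := (PySem.List.pyRange 0 length 1).foldl
    (fun (parts : List String) i =>
      let parts := parts ++ [(aMAP.get? (PySem.List.pyGetD sc.1 i 0)).getD ""]
      if PySem.List.pyGetD sc.2 i false = true ∧ i < length - 1 then parts ++ ["O"] else parts)
    []
  PySem.Str.join "" parts

-- ===== PORT B =====
-- _LETTERS = ("B", "Y", "G", "P")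
def bLETTERS : List String := ["B", "Y", "G", "P"]

def pattern_to_str_alt (pattern_int : Int) (length : Int) : String :=
  let st := (PySem.List.pyRange 0 length 1).foldl
    (fun (st : List String × Int) i =>
      -- pattern_int, v = divmod(pattern_int, 8); _LETTERS[v // 2] always in range (v // 2 ∈ 0..3)
      let parts := st.1 ++ [PySem.List.pyGetD bLETTERS (PySem.Int.floordiv (PySem.Int.mod st.2 8) 2) ""]
      let parts := if PySem.Int.mod (PySem.Int.mod st.2 8) 2 ≠ 0 ∧ i < length - 1 then parts ++ ["O"] else parts
      (parts, PySem.Int.floordiv st.2 8))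
    ([], pattern_int)
  PySem.Str.join "" st.1

-- ===== PRECONDITION & SPEC =====
def Spec_pattern_to_str (pattern_int : Int) (length : Int) (out : String) : Prop := out = pattern_to_str_alt pattern_int length
instance (pattern_int : Int) (length : Int) (out : String) : Decidable (Spec_pattern_to_str pattern_int length out) := by unfold Spec_pattern_to_str; infer_instance

-- ===== CLAIM (what is proved, stated in full; the proofs are below) =====
def Claim_equal_pattern_to_str : Prop := ∀ (pattern_int : Int) (length : Int), Dom_pattern_to_str pattern_int length → Spec_pattern_to_str pattern_int length (pattern_to_str pattern_int length)

-- ===== LEMMAS AND PROOFS =====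

-- reference shapes of the loops
def stL : Int → Nat → List Int
  | _, 0 => []
  | n, k+1 => PySem.Int.floordiv (PySem.Int.mod n 8) 2 :: stL (PySem.Int.floordiv n 8) k

def cnL : Int → Nat → List Bool
  | _, 0 => []
  | n, k+1 => decide (PySem.Int.mod (PySem.Int.mod n 8) 2 ≠ 0) :: cnL (PySem.Int.floordiv n 8) k

def finN : Int → Nat → Int
  | n, 0 => n
  | n, k+1 => finN (PySem.Int.floordiv n 8) k

def pB (length : Int) : Int → Int → Nat → List String
  | _, _, 0 => []
  | n, a, k+1 =>
      PySem.List.pyGetD bLETTERS (PySem.Int.floordiv (PySem.Int.mod n 8) 2) "" ::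
        ((if PySem.Int.mod (PySem.Int.mod n 8) 2 ≠ 0 ∧ a < length - 1 then ["O"] else []) ++
          pB length (PySem.Int.floordiv n 8) (a + 1) k)

def pA (length : Int) : List Int → List Bool → Int → List String
  | s :: S, c :: C, a =>
      (aMAP.get? s).getD "" ::
        ((if c = true ∧ a < length - 1 then ["O"] else []) ++ pA length S C (a + 1))
  | _, _, _ => []

theorem stL_length (n : Int) (k : Nat) : (stL n k).length = k := by
  induction k generalizing n with
  | zero => rfl
  | succ k ih => simp [stL, ih]

theorem cnL_length (n : Int) (k : Nat) : (cnL n k).length = k := by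
  induction k generalizing n with
  | zero => rfl
  | succ k ih => simp [cnL, ih]

theorem decode_loop (k : Nat) (a b : Int) (h : (b - a).toNat = k)
    (S : List Int) (C : List Bool) (n : Int) :
    (PySem.List.pyRange a b 1).foldl
      (fun (st : List Int × List Bool × Int) _ =>
        (st.1 ++ [PySem.Int.floordiv (PySem.Int.mod st.2.2 8) 2],
         st.2.1 ++ [decide (PySem.Int.mod (PySem.Int.mod st.2.2 8) 2 ≠ 0)],
         PySem.Int.floordiv st.2.2 8))
      (S, C, n)
    = (S ++ stL n k, C ++ cnL n k, finN n k) := by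
  induction k generalizing a S C n with
  | zero =>
      rw [PySem.List.pyRange_one_eq_nil (by omega)]
      simp [stL, cnL, finN]
  | succ k ih =>
      rw [PySem.List.pyRange_one_cons (by omega)]
      simp only [List.foldl_cons]
      rw [ih (a + 1) (by omega)]
      simp [stL, cnL, finN]

theorem b_loop (length : Int) : ∀ (k : Nat) (a : Int), (length - a).toNat = k →
    ∀ (acc : List String) (n : Int),
    (PySem.List.pyRange a length 1).foldl
      (fun (st : List String × Int) i =>
        (if PySem.Int.mod (PySem.Int.mod st.2 8) 2 ≠ 0 ∧ i < length - 1 then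
            (st.1 ++ [PySem.List.pyGetD bLETTERS (PySem.Int.floordiv (PySem.Int.mod st.2 8) 2) ""]) ++ ["O"]
          else st.1 ++ [PySem.List.pyGetD bLETTERS (PySem.Int.floordiv (PySem.Int.mod st.2 8) 2) ""],
         PySem.Int.floordiv st.2 8))
      (acc, n)
    = (acc ++ pB length n a k, finN n k) := by
  intro k
  induction k with
  | zero =>
      intro a h acc n
      rw [PySem.List.pyRange_one_eq_nil (by omega)]
      simp [pB, finN]
  | succ k ih =>
      intro a h acc n
      rw [PySem.List.pyRange_one_cons (by omega)]
      simp only [List.foldl_cons]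
      rw [ih (a + 1) (by omega)]
      show _ = (acc ++ pB length n a (k+1), finN n (k+1))
      simp only [pB, finN]
      split_ifs <;> simp

theorem a_loop (length : Int) (S : List Int) (C : List Bool) :
    ∀ (k : Nat) (a : Int), 0 ≤ a → (length - a).toNat = k →
    S.length = a.toNat + k → C.length = a.toNat + k → ∀ (acc : List String),
    (PySem.List.pyRange a length 1).foldl
      (fun (parts : List String) i =>
        if PySem.List.pyGetD C i false = true ∧ i < length - 1 then
          (parts ++ [(aMAP.get? (PySem.List.pyGetD S i 0)).getD ""]) ++ ["O"]
        else parts ++ [(aMAP.get? (PySem.List.pyGetD S i 0)).getD ""])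
      acc
    = acc ++ pA length (S.drop a.toNat) (C.drop a.toNat) a := by
  intro k
  induction k with
  | zero =>
      intro a ha h hS hC acc
      rw [PySem.List.pyRange_one_eq_nil (by omega)]
      have h1 : S.drop a.toNat = [] := List.drop_eq_nil_of_le (by omega)
      have h2 : C.drop a.toNat = [] := List.drop_eq_nil_of_le (by omega)
      simp [h1, h2, pA]
  | succ k ih =>
      intro a ha h hS hC acc
      rw [PySem.List.pyRange_one_cons (by omega)]
      simp only [List.foldl_cons]
      have hSa : a.toNat < S.length := by omega
      have hCa : a.toNat < C.length := by omega
      have hdS : S.drop a.toNat = S[a.toNat] :: S.drop (a.toNat + 1) :=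
        (List.getElem_cons_drop hSa).symm
      have hdC : C.drop a.toNat = C[a.toNat] :: C.drop (a.toNat + 1) :=
        (List.getElem_cons_drop hCa).symm
      have hgS : PySem.List.pyGetD S a 0 = S[a.toNat] := by
        rw [PySem.List.pyGetD_eq_getElem S (i := a) 0 ha (by omega)]
      have hgC : PySem.List.pyGetD C a false = C[a.toNat] := by
        rw [PySem.List.pyGetD_eq_getElem C (i := a) false ha (by omega)]
      have hnat : (a + 1).toNat = a.toNat + 1 := by omega
      rw [ih (a + 1) (by omega) (by omega) (by omega) (by omega)]
      rw [hdS, hdC]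
      simp only [pA, hgS, hgC, hnat]
      split_ifs <;> simp

-- bridge between the two per-digit emissions
theorem letter_eq (d : Int) (h0 : 0 ≤ d) (h4 : d < 4) :
    (aMAP.get? d).getD "" = PySem.List.pyGetD bLETTERS d "" := by
  interval_cases d <;> decide

theorem pA_eq_pB (k : Nat) (length : Int) (n a : Int) :
    pA length (stL n k) (cnL n k) a = pB length n a k := by
  induction k generalizing n a with
  | zero => rfl
  | succ k ih =>
      have hd0 : (0:Int) ≤ PySem.Int.floordiv (PySem.Int.mod n 8) 2 := by
        have := PySem.Int.mod_nonneg (a := n) (b := 8) (by norm_num)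
        rw [PySem.Int.floordiv_eq_ediv_of_pos (by norm_num)]; omega
      have hd4 : PySem.Int.floordiv (PySem.Int.mod n 8) 2 < 4 := by
        have := PySem.Int.mod_lt (a := n) (b := 8) (by norm_num)
        rw [PySem.Int.floordiv_eq_ediv_of_pos (by norm_num)]; omega
      simp only [stL, cnL, pA, pB, ih, letter_eq _ hd0 hd4, decide_eq_true_iff]

-- ===== VERDICT (by name: the statement is the Claim_ definition above) =====
theorem pattern_to_str_spec : Claim_equal_pattern_to_str := by
  intro p L _
  unfold Spec_pattern_to_str
  simp only [pattern_to_str, pattern_to_str_alt, decode_pattern]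
  rw [decode_loop L.toNat 0 L (by omega)]
  simp only [List.nil_append]
  rw [a_loop L (stL p L.toNat) (cnL p L.toNat) L.toNat 0 (by omega) (by omega)
        (by simp [stL_length]) (by simp [cnL_length])]
  rw [b_loop L L.toNat 0 (by omega)]
  simp [pA_eq_pB]
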